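-- pv_equiv track=rewrite | github.com/ceciliapeng2011/aboutSHW | opencl/tests/pageatten/test_pa_multiseq.py | _group_gpu_ns_per_iter
-- ===== SOURCE A (Python) =====
-- def _group_gpu_ns_per_iter(gpu_latency_ns: list[int], kernels_per_iter: int, n_iters: int) -> list[int]:
--     if kernels_per_iter <= 0:
--         raise ValueError("kernels_per_iter must be positive")
--     if len(gpu_latency_ns) != n_iters * kernels_per_iter:
--         raise ValueError(
--             f"Unexpected gpu latency sample count: got {len(gpu_latency_ns)}, expected {n_iters * kernels_per_iter}"
--         )
--     grouped = []
--     for iter_index in range(n_iters):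
--         start = iter_index * kernels_per_iter
--         end = start + kernels_per_iter
--         grouped.append(int(sum(gpu_latency_ns[start:end])))
--     return grouped
-- ===== SOURCE B (Python) =====
-- def _group_gpu_ns_per_iter(gpu_latency_ns: list[int], kernels_per_iter: int, n_iters: int) -> list[int]:
--     if kernels_per_iter <= 0:
--         raise ValueError("kernels_per_iter must be positive")
--     if len(gpu_latency_ns) != n_iters * kernels_per_iter:
--         raise ValueError(
--             f"Unexpected gpu latency sample count: got {len(gpu_latency_ns)}, expected {n_iters * kernels_per_iter}"
--         )
--     grouped = []
--     acc = 0
--     c = 0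
--     for v in gpu_latency_ns:
--         acc += v
--         c += 1
--         if c == kernels_per_iter:
--             grouped.append(int(acc))
--             acc = 0
--             c = 0
--     return grouped
-- ===== Notes on version B (the rewrite author's own statement) =====
-- stated objective: alternative
-- what changed: Replaces the per-iteration loop with index arithmetic and slice-and-sum by a single linear pass over the samples maintaining a running sum and a counter, emitting a group each time the counter reaches kernels_per_iter.
import Mathlib
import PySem

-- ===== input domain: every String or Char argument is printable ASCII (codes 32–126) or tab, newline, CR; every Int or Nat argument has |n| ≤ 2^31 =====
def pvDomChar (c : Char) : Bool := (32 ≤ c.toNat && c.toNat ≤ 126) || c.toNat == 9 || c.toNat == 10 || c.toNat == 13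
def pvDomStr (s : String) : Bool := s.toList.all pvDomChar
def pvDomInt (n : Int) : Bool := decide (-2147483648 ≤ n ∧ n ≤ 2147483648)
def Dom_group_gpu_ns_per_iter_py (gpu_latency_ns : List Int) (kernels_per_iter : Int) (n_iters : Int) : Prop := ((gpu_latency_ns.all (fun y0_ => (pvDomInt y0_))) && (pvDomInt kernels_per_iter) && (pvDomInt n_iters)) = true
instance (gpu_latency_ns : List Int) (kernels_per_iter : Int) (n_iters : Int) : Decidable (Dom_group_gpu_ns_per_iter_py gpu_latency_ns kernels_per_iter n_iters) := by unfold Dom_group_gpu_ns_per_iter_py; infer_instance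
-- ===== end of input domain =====

-- B makes one linear pass with a running sum and counter instead of A's per-iteration slice-and-sum;
-- equivalence of the return values is proved on Pre_ (the inputs where A does not raise).

-- ===== PORT A =====
def group_gpu_ns_per_iter_py (gpu_latency_ns : List Int) (kernels_per_iter : Int) (n_iters : Int) : List Int :=
  -- guards: kernels_per_iter ≤ 0 or a length mismatch raise ValueError → excluded by Pre_
  (PySem.List.pyRange 0 n_iters 1).foldl
    (fun grouped iter_index =>
      grouped ++ [(PySem.List.slice gpu_latency_ns (some (iter_index * kernels_per_iter))
                    (some (iter_index * kernels_per_iter + kernels_per_iter))).sum]) []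

-- ===== PORT B =====
def group_gpu_ns_per_iter_py_alt (gpu_latency_ns : List Int) (kernels_per_iter : Int) (n_iters : Int) : List Int :=
  -- same guards as A (raise → excluded by Pre_); then one pass with (grouped, acc, c)
  (gpu_latency_ns.foldl
    (fun (st : List Int × Int × Int) v =>
      let acc := st.2.1 + v
      let c := st.2.2 + 1
      if c = kernels_per_iter then (st.1 ++ [acc], 0, 0) else (st.1, acc, c))
    ([], 0, 0)).1

-- ===== PRECONDITION & SPEC =====
-- exactly the inputs where A's two guards do not raise ValueError
def Pre_group_gpu_ns_per_iter_py (gpu_latency_ns : List Int) (kernels_per_iter : Int) (n_iters : Int) : Prop :=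
  0 < kernels_per_iter ∧ (gpu_latency_ns.length : Int) = n_iters * kernels_per_iter
instance (gpu_latency_ns : List Int) (kernels_per_iter : Int) (n_iters : Int) : Decidable (Pre_group_gpu_ns_per_iter_py gpu_latency_ns kernels_per_iter n_iters) := by unfold Pre_group_gpu_ns_per_iter_py; infer_instance
def pvWitness_group_gpu_ns_per_iter_py : List Int × Int × Int := ([1, 2, 3, 4, 5, 6], 2, 3)
def Spec_group_gpu_ns_per_iter_py (gpu_latency_ns : List Int) (kernels_per_iter : Int) (n_iters : Int) (out : List Int) : Prop := out = group_gpu_ns_per_iter_py_alt gpu_latency_ns kernels_per_iter n_iters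
instance (gpu_latency_ns : List Int) (kernels_per_iter : Int) (n_iters : Int) (out : List Int) : Decidable (Spec_group_gpu_ns_per_iter_py gpu_latency_ns kernels_per_iter n_iters out) := by unfold Spec_group_gpu_ns_per_iter_py; infer_instance

-- ===== CLAIM (what is proved, stated in full; the proofs are below) =====
def Claim_equal_group_gpu_ns_per_iter_py : Prop := ∀ (gpu_latency_ns : List Int) (kernels_per_iter : Int) (n_iters : Int), Dom_group_gpu_ns_per_iter_py gpu_latency_ns kernels_per_iter n_iters → Pre_group_gpu_ns_per_iter_py gpu_latency_ns kernels_per_iter n_iters → Spec_group_gpu_ns_per_iter_py gpu_latency_ns kernels_per_iter n_iters (group_gpu_ns_per_iter_py gpu_latency_ns kernels_per_iter n_iters)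

-- ===== LEMMAS AND PROOFS =====

-- canonical value: the list of sums of consecutive K-chunks, m chunks
def chunkSums (K : Nat) : Nat → List Int → List Int
  | 0, _ => []
  | m + 1, xs => (xs.take K).sum :: chunkSums K m (xs.drop K)

-- A-side: the mapped slice-sums are the chunk sums
theorem map_range_eq_chunkSums (K : Nat) : ∀ (m : Nat) (xs : List Int),
    (List.range m).map (fun j => ((xs.drop (j * K)).take K).sum) = chunkSums K m xs := by
  intro m
  induction m with
  | zero => intro xs; simp [chunkSums]
  | succ m ih =>
    intro xs
    rw [List.range_succ_eq_map, List.map_cons, List.map_map, chunkSums]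
    refine congrArg₂ _ (by simp) ?_
    rw [← ih (xs.drop K)]
    refine List.map_congr_left (fun j _ => ?_)
    simp only [Function.comp_apply, List.drop_drop]
    rw [show j.succ * K = K + j * K by simp [Nat.succ_eq_add_one]; ring]

theorem portA_eq_chunkSums (xs : List Int) (k n : Int) (hk : 0 < k) (hn : 0 ≤ n) :
    group_gpu_ns_per_iter_py xs k n = chunkSums k.toNat n.toNat xs := by
  unfold group_gpu_ns_per_iter_py
  rw [PySem.List.foldl_append_singleton_eq_map, List.nil_append, PySem.List.pyRange_one,
    List.map_map]
  have hzn : ((0 : Int) - 0) = 0 := by ring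
  have hK : k = (k.toNat : Int) := (Int.toNat_of_nonneg hk.le).symm
  rw [show (n - 0) = n by ring, ← map_range_eq_chunkSums k.toNat n.toNat xs]
  refine List.map_congr_left (fun j _ => ?_)
  simp only [Function.comp_apply, zero_add]
  rw [hK, show ((j : Int) * (k.toNat : Int)) = ((j * k.toNat : Nat) : Int) by push_cast; ring,
    PySem.List.slice_natCast_add]
  simp only [Int.toNat_natCast]

-- B's loop body, named for the lemmas
def altStep (k : Int) (st : List Int × Int × Int) (v : Int) : List Int × Int × Int :=
  let acc := st.2.1 + v
  let c := st.2.2 + 1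
  if c = k then (st.1 ++ [acc], 0, 0) else (st.1, acc, c)

-- consuming one full chunk closes exactly one group
theorem altStep_consume_chunk (k : Int) : ∀ (chunk : List Int), chunk ≠ [] →
    ∀ (rest res : List Int) (acc c : Int), 0 ≤ c → c + chunk.length = k →
    (chunk ++ rest).foldl (altStep k) (res, acc, c)
      = rest.foldl (altStep k) (res ++ [acc + chunk.sum], 0, 0) := by
  intro chunk
  induction chunk with
  | nil => intro h; exact absurd rfl h
  | cons v t ih =>
    intro _ rest res acc c hc hlen
    rcases eq_or_ne t [] with rfl | ht
    · simp only [List.length_cons, List.length_nil, Nat.cast_add, Nat.cast_zero] at hlen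
      simp only [List.cons_append, List.nil_append, List.foldl_cons, altStep]
      rw [if_pos (by omega)]
      simp
    · simp only [List.cons_append, List.foldl_cons, altStep]
      rw [if_neg (by
        have : 0 < t.length := List.length_pos_of_ne_nil ht
        simp only [List.length_cons, Nat.cast_add, Nat.cast_one] at hlen
        omega)]
      rw [ih ht rest res (acc + v) (c + 1) (by omega)
        (by simp only [List.length_cons, Nat.cast_add, Nat.cast_one] at hlen; omega)]
      simp only [List.sum_cons]
      ring_nf

theorem portB_loop_eq_chunkSums (k : Int) (K : Nat) (hK : k = (K : Int)) (hKpos : 0 < K) :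
    ∀ (m : Nat) (xs res : List Int), xs.length = m * K →
    (xs.foldl (altStep k) (res, 0, 0)).1 = res ++ chunkSums K m xs := by
  intro m
  induction m with
  | zero =>
    intro xs res hlen
    have hnil : xs = [] := List.eq_nil_of_length_eq_zero (by omega)
    subst hnil
    simp [chunkSums]
  | succ m ih =>
    intro xs res hlen
    have hKle : K ≤ xs.length := by nlinarith [Nat.succ_mul m K]
    have htlen : (xs.take K).length = K := by simp [Nat.min_eq_left hKle]
    have hne : xs.take K ≠ [] := by
      intro h; rw [h] at htlen; simp at htlen; omega
    have hsplit : xs = xs.take K ++ xs.drop K := (List.take_append_drop K xs).symm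
    conv_lhs => rw [hsplit]
    rw [altStep_consume_chunk k (xs.take K) hne (xs.drop K) res 0 0 le_rfl
      (by rw [htlen, hK]; ring)]
    rw [ih (xs.drop K) _ (by simp [Nat.succ_mul] at hlen ⊢; omega)]
    simp [chunkSums]

theorem portB_eq_chunkSums (xs : List Int) (k n : Int) (hk : 0 < k)
    (hlen : (xs.length : Int) = n * k) :
    group_gpu_ns_per_iter_py_alt xs k n = chunkSums k.toNat n.toNat xs := by
  have hn : 0 ≤ n := by nlinarith
  have hK : k = (k.toNat : Int) := (Int.toNat_of_nonneg hk.le).symm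
  have hN : n = (n.toNat : Int) := (Int.toNat_of_nonneg hn).symm
  have hlenN : xs.length = n.toNat * k.toNat := by
    have h2 : (xs.length : Int) = (n.toNat : Int) * (k.toNat : Int) := by
      rw [hlen, ← hK, ← hN]
    exact_mod_cast h2
  have := portB_loop_eq_chunkSums k k.toNat hK (by omega) n.toNat xs [] hlenN
  unfold group_gpu_ns_per_iter_py_alt
  simpa [altStep] using this

-- ===== VERDICT (by name: the statement is the Claim_ definition above) =====
theorem group_gpu_ns_per_iter_py_spec : Claim_equal_group_gpu_ns_per_iter_py := by
  intro xs k n _ hpre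
  obtain ⟨hk, hlen⟩ := hpre
  unfold Spec_group_gpu_ns_per_iter_py
  rw [portA_eq_chunkSums xs k n hk (by nlinarith), portB_eq_chunkSums xs k n hk hlen]
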